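-- pv_equiv track=rewrite | github.com/mchouai27/vlm-odd-pipeline | processing/preprocess_normalize.py | correct_number_of_lanes
-- ===== SOURCE A (Python) =====
-- from typing import Any, Dict, List, Tuple
--
-- def correct_number_of_lanes(sequence: List[Any], min_consecutive: int = 3) -> List[Any]:
--     """
--     Remove short spikes in lane count:
--       - If a distinct short block (length < min_consecutive) differs from both neighbors,
--         overwrite it with the previous value.
--     """
--     corrected = list(sequence)
--     n = len(corrected)
--     i = 0
--     while i < n:
--         curr = corrected[i]
--         count = 1
--         while (i + count) < n and corrected[i + count] == curr:
--             count += 1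
--         prev_val = corrected[i - 1] if i > 0 else curr
--         next_val = corrected[i + count] if (i + count) < n else curr
--         if curr != prev_val and curr != next_val and count < min_consecutive:
--             for j in range(i, i + count):
--                 corrected[j] = prev_val
--         i += count
--     return corrected
-- ===== SOURCE B (Python) =====
-- def correct_number_of_lanes(sequence, min_consecutive=3):
--     # Phase 1: run-length encode the input as (value, length) pairs.
--     runs = []
--     cur = None
--     cnt = 0
--     for v in sequence:
--         if cnt > 0 and v == cur:
--             cnt += 1
--         else:
--             if cnt > 0:
--                 runs.append((cur, cnt))
--             cur = v
--             cnt = 1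
--     if cnt > 0:
--         runs.append((cur, cnt))
--     # Phase 2: fold over runs keeping the effective previous value.
--     out = []
--     prev = None
--     for idx, (v, length) in enumerate(runs):
--         prev_val = v if prev is None else prev
--         next_val = runs[idx + 1][0] if idx + 1 < len(runs) else v
--         if v != prev_val and v != next_val and length < min_consecutive:
--             out.extend([prev_val] * length)
--         else:
--             out.extend([v] * length)
--             prev = v
--     return out
-- ===== Notes on version B (the rewrite author's own statement) =====
-- stated objective: alternative
-- what changed: A mutates a copy of the list in place with an index-based while loop that rescans and overwrites slices; B is a two-phase pipeline that first run-length encodes the input into (value,length) pairs and then folds over the run list with an 'effective previous value' accumulator, concatenating replicated runs without any mutation.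
import Mathlib
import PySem

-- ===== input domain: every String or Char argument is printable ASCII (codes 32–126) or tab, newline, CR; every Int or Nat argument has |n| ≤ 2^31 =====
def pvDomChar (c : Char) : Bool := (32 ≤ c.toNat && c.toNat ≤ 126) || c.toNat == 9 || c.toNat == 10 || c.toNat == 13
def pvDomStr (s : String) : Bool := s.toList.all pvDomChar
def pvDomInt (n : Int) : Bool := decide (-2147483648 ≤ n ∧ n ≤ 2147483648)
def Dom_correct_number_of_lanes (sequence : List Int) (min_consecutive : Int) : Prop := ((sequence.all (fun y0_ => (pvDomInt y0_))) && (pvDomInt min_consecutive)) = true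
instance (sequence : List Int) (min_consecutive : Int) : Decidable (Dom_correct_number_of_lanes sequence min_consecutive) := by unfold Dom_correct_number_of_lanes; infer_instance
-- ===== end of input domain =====

-- B replaces A's in-place index-rewriting scan by a two-phase pipeline (run-length
-- encode, then fold over the runs with an effective-previous accumulator); objective:
-- alternative decomposition, same exact return value (no mutation of the argument).

-- ===== PORT A =====
-- inner `while (i + count) < n and corrected[i + count] == curr: count += 1`
def pvCountRun (corrected : List Int) (n i : Nat) (curr : Int) (count : Nat) : Nat :=
  if h : i + count < n ∧ corrected.getD (i + count) 0 = curr then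
    pvCountRun corrected n i curr (count + 1)
  else count
termination_by n - (i + count)
decreasing_by omega

theorem pvCountRun_ge (corrected : List Int) (n i : Nat) (curr : Int) (count : Nat) :
    count ≤ pvCountRun corrected n i curr count := by
  fun_induction pvCountRun with
  | case1 _ _ ih => omega
  | case2 => omega

-- `for j in range(i, i + count): corrected[j] = prev_val` (indices always in range)
def pvSetRun (corrected : List Int) (i count : Nat) (prev_val : Int) : List Int :=
  (List.range' i count).foldl (fun c j => c.set j prev_val) corrected

-- the outer `while i < n` loop; all indexing is in range, so getD 0 is exact
def pvLoopA (corrected : List Int) (n i : Nat) (minc : Int) : List Int :=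
  if _h : i < n then
    let curr := corrected.getD i 0
    let count := pvCountRun corrected n i curr 1
    let prev_val := if 0 < i then corrected.getD (i - 1) 0 else curr
    let next_val := if i + count < n then corrected.getD (i + count) 0 else curr
    let corrected' :=
      if curr ≠ prev_val ∧ curr ≠ next_val ∧ (count : Int) < minc then
        pvSetRun corrected i count prev_val
      else corrected
    pvLoopA corrected' n (i + count) minc
  else corrected
termination_by n - i
decreasing_by
  have := pvCountRun_ge corrected n i (corrected.getD i 0) 1
  omega

def correct_number_of_lanes (sequence : List Int) (min_consecutive : Int) : List Int :=
  pvLoopA sequence sequence.length 0 min_consecutive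

-- ===== PORT B =====
-- phase-1 loop body: compare with the open run, extend it or flush and start a new one
def pvRunStep (st : List (Int × Nat) × Int × Nat) (v : Int) : List (Int × Nat) × Int × Nat :=
  if 0 < st.2.2 ∧ v = st.2.1 then (st.1, st.2.1, st.2.2 + 1)
  else ((if 0 < st.2.2 then st.1 ++ [(st.2.1, st.2.2)] else st.1), v, 1)

def pvBuildRuns (sequence : List Int) : List (Int × Nat) :=
  let st := sequence.foldl pvRunStep ([], 0, 0)
  if 0 < st.2.2 then st.1 ++ [(st.2.1, st.2.2)] else st.1

-- phase-2 fold: `prev` is the effective previous value; the next run's value is the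
-- head of the remaining run list (Source B reads runs[idx+1][0])
def pvSmooth (minc : Int) (prev : Option Int) : List (Int × Nat) → List Int
  | [] => []
  | (v, len) :: rest =>
    let prev_val := prev.getD v
    let next_val := match rest with | [] => v | (w, _) :: _ => w
    if v ≠ prev_val ∧ v ≠ next_val ∧ (len : Int) < minc then
      List.replicate len prev_val ++ pvSmooth minc prev rest
    else
      List.replicate len v ++ pvSmooth minc (some v) rest

def correct_number_of_lanes_alt (sequence : List Int) (min_consecutive : Int) : List Int :=
  pvSmooth min_consecutive none (pvBuildRuns sequence)

-- ===== PRECONDITION & SPEC =====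
def Spec_correct_number_of_lanes (sequence : List Int) (min_consecutive : Int) (out : List Int) : Prop := out = correct_number_of_lanes_alt sequence min_consecutive
instance (sequence : List Int) (min_consecutive : Int) (out : List Int) : Decidable (Spec_correct_number_of_lanes sequence min_consecutive out) := by unfold Spec_correct_number_of_lanes; infer_instance

-- ===== CLAIM (what is proved, stated in full; the proofs are below) =====
def Claim_equal_correct_number_of_lanes : Prop := ∀ (sequence : List Int) (min_consecutive : Int), Dom_correct_number_of_lanes sequence min_consecutive → Spec_correct_number_of_lanes sequence min_consecutive (correct_number_of_lanes sequence min_consecutive)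

-- ===== LEMMAS AND PROOFS =====

-- reference run-length encoding used by the proof
def pvRle : List Int → List (Int × Nat)
  | [] => []
  | y :: t => (y, (t.takeWhile (· = y)).length + 1) :: pvRle (t.dropWhile (· = y))
termination_by l => l.length
decreasing_by simpa using Nat.lt_succ_of_le (t.length_dropWhile_le _)

theorem pvBuildRuns_loop (l : List Int) : ∀ (runs : List (Int × Nat)) (cur : Int) (cnt : Nat),
    0 < cnt →
    (let st := l.foldl pvRunStep (runs, cur, cnt);
     if 0 < st.2.2 then st.1 ++ [(st.2.1, st.2.2)] else st.1)
      = runs ++ (cur, cnt + (l.takeWhile (· = cur)).length) :: pvRle (l.dropWhile (· = cur)) := by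
  induction l with
  | nil => intro runs cur cnt hc; simp [pvRle, if_pos hc]
  | cons v t ih =>
    intro runs cur cnt hc
    by_cases hv : v = cur
    · have hstep : pvRunStep (runs, cur, cnt) v = (runs, cur, cnt + 1) := by
        simp [pvRunStep, hv, hc]
      simp only [List.foldl_cons, hstep]
      have h := ih runs cur (cnt + 1) (by omega)
      simp only [h, hv]
      simp
      omega
    · have hstep : pvRunStep (runs, cur, cnt) v = (runs ++ [(cur, cnt)], v, 1) := by
        simp [pvRunStep, hv, hc]
      simp only [List.foldl_cons, hstep]
      have h := ih (runs ++ [(cur, cnt)]) v 1 (by omega)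
      simp only [h]
      rw [List.takeWhile_cons_of_neg (by simpa using hv),
          List.dropWhile_cons_of_neg (by simpa using hv)]
      simp [pvRle, List.append_assoc]
      omega

theorem pvBuildRuns_eq_rle (l : List Int) : pvBuildRuns l = pvRle l := by
  cases l with
  | nil => simp [pvBuildRuns, pvRle]
  | cons v t =>
    unfold pvBuildRuns
    have hstep : pvRunStep ([], 0, 0) v = ([], v, 1) := by simp [pvRunStep]
    simp only [List.foldl_cons, hstep]
    have h := pvBuildRuns_loop t [] v 1 (by omega)
    simp only at h
    rw [h]
    simp [pvRle]
    omega

theorem pvCountRun_spec (l : List Int) (n i : Nat) (curr : Int) :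
    ∀ (m c : Nat), (∀ j, j < m → l.getD (i + c + j) 0 = curr) →
    (i + c + m = n ∨ (i + c + m < n ∧ l.getD (i + c + m) 0 ≠ curr)) →
    pvCountRun l n i curr c = c + m := by
  intro m
  induction m with
  | zero =>
    intro c _ hend
    have hneg : ¬(i + c < n ∧ l.getD (i + c) 0 = curr) := by
      rcases hend with h | h
      · rintro ⟨h1, _⟩; omega
      · rintro ⟨_, h2⟩
        have h2' : l.getD (i + c + 0) 0 ≠ curr := h.2
        simp only [Nat.add_zero] at h2'
        exact h2' h2
    unfold pvCountRun
    rw [dif_neg hneg]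
    omega
  | succ m ih =>
    intro c hall hend
    unfold pvCountRun
    rw [dif_pos ⟨by omega, by simpa using hall 0 (by omega)⟩]
    have := ih (c + 1) (fun j hj => by
      have := hall (j + 1) (by omega); simpa [Nat.add_assoc, Nat.add_comm 1 j] using this)
      (by rcases hend with h | h
          · left; omega
          · right; constructor; · omega
            · have := h.2; rw [show i + (c+1) + m = i + c + (m+1) by omega]; exact this)
    omega

theorem pvSetRun_spec (p : Int) : ∀ (k : Nat) (done mid rest : List Int), mid.length = k →
    (List.range' done.length k).foldl (fun c j => c.set j p) (done ++ (mid ++ rest))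
      = done ++ (List.replicate k p ++ rest) := by
  intro k
  induction k with
  | zero =>
    intro done mid rest hm
    have : mid = [] := List.eq_nil_of_length_eq_zero hm
    simp [this]
  | succ k ih =>
    intro done mid rest hm
    rcases mid with _ | ⟨m0, mid'⟩
    · simp at hm
    · have hset : (done ++ (m0 :: mid' ++ rest)).set done.length p
          = (done ++ [p]) ++ (mid' ++ rest) := by
        rw [List.set_append_right _ _ (le_refl done.length)]
        simp
      rw [List.range'_succ, List.foldl_cons, hset]
      have h := ih (done ++ [p]) mid' rest (by simpa using Nat.succ_injective hm)
      simp only [List.length_append, List.length_cons, List.length_nil, Nat.zero_add] at h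
      rw [h]
      simp [List.replicate_succ]

-- small bridge lemmas
theorem pv_getD_mid (a b : List Int) (j : Nat) (d : Int) :
    (a ++ b).getD (a.length + j) d = b.getD j d := by
  simp only [List.getD]
  rw [List.getElem?_append_right (by omega : a.length ≤ a.length + j)]
  simp

theorem pv_rest_decomp (y : Int) (t : List Int) :
    y :: t = List.replicate ((t.takeWhile (· = y)).length + 1) y ++ t.dropWhile (· = y) := by
  have h1 : List.takeWhile (· = y) t = List.replicate (List.takeWhile (· = y) t).length y := by
    apply List.eq_replicate_of_mem
    intro z hz
    simpa using (List.mem_takeWhile_imp hz)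
  conv_lhs => rw [← List.takeWhile_append_dropWhile (p := (· = y)) (l := t)]
  rw [List.replicate_succ, ← h1]
  rfl

theorem pv_head_dropWhile (y z : Int) (t : List Int) :
    (t.dropWhile (· = y)).head? = some z → z ≠ y := by
  induction t with
  | nil => intro h; simp at h
  | cons a t ih =>
    by_cases ha : a = y
    · simpa [List.dropWhile_cons, ha] using ih
    · intro h
      rw [List.dropWhile_cons_of_neg (by simpa using ha)] at h
      simp only [List.head?_cons, Option.some.injEq] at h
      subst h; exact ha

theorem pv_getLast_getD (done : List Int) (rest : List Int) (y : Int) (h : done ≠ []) :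
    (done ++ rest).getD (done.length - 1) 0 = (done.getLast?).getD y := by
  have hl : 0 < done.length := List.length_pos_of_ne_nil h
  rw [List.getD_append _ _ _ _ (by omega)]
  rw [List.getLast?_eq_getElem?]
  simp [List.getD, List.getElem?_eq_getElem (by omega : done.length - 1 < done.length)]

theorem pv_getLast_append_replicate (done : List Int) (k : Nat) (p : Int) (hk : 0 < k) :
    (done ++ List.replicate k p).getLast? = some p := by
  rcases Nat.exists_eq_add_of_lt hk with ⟨j, hj⟩
  rw [show k = j + 1 by omega, List.replicate_succ', ← List.append_assoc]
  simp

theorem pvSmooth_cons (minc : Int) (prev : Option Int) (v : Int) (len : Nat)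
    (rest : List (Int × Nat)) :
    pvSmooth minc prev ((v, len) :: rest) =
      if v ≠ prev.getD v ∧ v ≠ ((rest.head?.map Prod.fst).getD v) ∧ (len : Int) < minc then
        List.replicate len (prev.getD v) ++ pvSmooth minc prev rest
      else
        List.replicate len v ++ pvSmooth minc (some v) rest := by
  cases rest with
  | nil => rfl
  | cons a rs => rcases a with ⟨w, m⟩; rfl

theorem pvLoopA_eq (minc : Int) : ∀ (N : Nat) (rest done : List Int), rest.length ≤ N →
    pvLoopA (done ++ rest) (done.length + rest.length) done.length minc
      = done ++ pvSmooth minc done.getLast? (pvRle rest) := by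
  intro N
  induction N with
  | zero =>
    intro rest done hN
    have : rest = [] := List.eq_nil_of_length_eq_zero (by omega)
    subst this
    rw [pvLoopA]
    simp [pvRle, pvSmooth]
  | succ N ih =>
    intro rest done hN
    rcases rest with _ | ⟨y, t⟩
    · rw [pvLoopA]; simp [pvRle, pvSmooth]
    · -- rest = y :: t: peel one run of length k
      have hdecomp := pv_rest_decomp y t
      set k : Nat := (t.takeWhile (· = y)).length + 1 with hkdef
      set rest2 : List Int := t.dropWhile (· = y) with hr2
      have hk1 : 0 < k := by omega
      have hklen : k + rest2.length = (y :: t).length := by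
        rw [hdecomp]; simp
      have hcurr : (done ++ y :: t).getD done.length 0 = y := by
        have h := pv_getD_mid done (y :: t) 0 0
        rw [Nat.add_zero] at h
        rw [h]
        rfl
      have hrep : ∀ j, j < k → (List.replicate k y ++ rest2).getD j 0 = y := by
        intro j hj
        rw [List.getD_append _ _ _ _ (by simpa using hj)]
        simp [List.getD, hj]
      have hcount : pvCountRun (done ++ y :: t) (done.length + (y :: t).length)
          done.length y 1 = k := by
        have h := pvCountRun_spec (done ++ y :: t) (done.length + (y :: t).length)
          done.length y (k - 1) 1 ?_ ?_
        · rw [h]; omega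
        · intro j hj
          rw [show done.length + 1 + j = done.length + (1 + j) by omega, pv_getD_mid,
            hdecomp]
          exact hrep (1 + j) (by omega)
        · rcases hr2e : rest2 with _ | ⟨z, t2⟩
          · left
            have : (y :: t).length = k := by rw [← hklen, hr2e]; simp
            omega
          · right
            have hl2 : rest2.length = t2.length + 1 := by rw [hr2e]; simp
            constructor
            · omega
            · rw [show done.length + 1 + (k - 1) = done.length + k by omega, pv_getD_mid,
                hdecomp]
              rw [List.getD_append_right _ _ _ _ (by simp)]
              simp only [List.length_replicate, Nat.sub_self, hr2e]
              have hz : z ≠ y := pv_head_dropWhile y z t (by rw [← hr2, hr2e]; rfl)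
              simpa using hz
      rw [pvLoopA, dif_pos (by simp : done.length < done.length + (y :: t).length)]
      simp only [hcurr, hcount]
      have hprevv : (if 0 < done.length then (done ++ y :: t).getD (done.length - 1) 0 else y)
          = done.getLast?.getD y := by
        rcases done with _ | ⟨d, ds⟩
        · simp
        · rw [if_pos (by simp)]
          exact pv_getLast_getD (d :: ds) (y :: t) y (by simp)
      simp only [hprevv]
      rcases hr2e : rest2 with _ | ⟨z, t2⟩
      · -- no following run: the spike condition is vacuously false on both sides
        have hlen : (y :: t).length = k := by rw [hr2e] at hklen; simpa using hklen.symm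
        rw [if_neg (show ¬ done.length + k < done.length + (y :: t).length by omega)]
        rw [if_neg (by rintro ⟨-, h2, -⟩; exact h2 rfl)]
        rw [pvLoopA, dif_neg (by omega)]
        have hrle : pvRle (y :: t) = [(y, k)] := by
          rw [pvRle, ← hkdef, ← hr2, hr2e, pvRle]
        rw [hrle, pvSmooth_cons]
        rw [if_neg (by rintro ⟨-, h2, -⟩; exact h2 (by simp))]
        rw [hdecomp, hr2e]
        simp [pvSmooth]
      · have hz : z ≠ y := pv_head_dropWhile y z t (by rw [← hr2, hr2e]; rfl)
        have hl2 : rest2.length = t2.length + 1 := by rw [hr2e]; simp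
        have hlt : done.length + k < done.length + (y :: t).length := by omega
        have hgetnext : (done ++ y :: t).getD (done.length + k) 0 = z := by
          rw [hdecomp, hr2e, pv_getD_mid, List.getD_append_right _ _ _ _ (by simp)]
          simp
        rw [if_pos hlt, hgetnext]
        have hrle2 : pvRle (y :: t) = (y, k) :: pvRle (z :: t2) := by
          rw [pvRle, ← hkdef, ← hr2, hr2e]
        have hrlez : pvRle (z :: t2)
            = (z, (t2.takeWhile (· = z)).length + 1) :: pvRle (t2.dropWhile (· = z)) := by
          rw [pvRle]
        have hheadz : (((pvRle (z :: t2)).head?.map Prod.fst).getD y) = z := by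
          rw [hrlez]; rfl
        rw [hrle2, pvSmooth_cons, hheadz]
        have hNrec : (z :: t2).length ≤ N := by
          simp only [List.length_cons] at hN hklen ⊢
          omega
        by_cases hC : y ≠ done.getLast?.getD y ∧ y ≠ z ∧ (k : Int) < minc
        · -- short distinct spike: overwrite with the previous value
          rw [if_pos hC, if_pos hC]
          rcases hgl : done.getLast? with _ | p
          · exfalso
            have h1 := hC.1
            rw [hgl] at h1
            exact h1 rfl
          · simp only [Option.getD_some]
            have hset : pvSetRun (done ++ y :: t) done.length k p
                = (done ++ List.replicate k p) ++ (z :: t2) := by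
              unfold pvSetRun
              rw [show done ++ y :: t = done ++ (List.replicate k y ++ (z :: t2)) from by
                rw [hdecomp, hr2e]]
              rw [pvSetRun_spec p k done (List.replicate k y) (z :: t2) (by simp)]
              rw [List.append_assoc]
            rw [hset]
            have hi' : done.length + k = (done ++ List.replicate k p).length := by simp
            have hn' : done.length + (y :: t).length
                = (done ++ List.replicate k p).length + (z :: t2).length := by
              simp only [List.length_append, List.length_replicate, List.length_cons] at hklen ⊢
              omega
            rw [hn', hi', ih (z :: t2) (done ++ List.replicate k p) hNrec]
            rw [pv_getLast_append_replicate done k p hk1]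
            simp [List.append_assoc]
        · -- keep the run
          rw [if_neg hC, if_neg hC]
          rw [show done ++ y :: t = (done ++ List.replicate k y) ++ (z :: t2) from by
            rw [hdecomp, hr2e, List.append_assoc]]
          have hi' : done.length + k = (done ++ List.replicate k y).length := by simp
          have hn' : done.length + (y :: t).length
              = (done ++ List.replicate k y).length + (z :: t2).length := by
            simp only [List.length_append, List.length_replicate, List.length_cons] at hklen ⊢
            omega
          rw [hn', hi', ih (z :: t2) (done ++ List.replicate k y) hNrec]
          rw [pv_getLast_append_replicate done k y hk1]
          simp [List.append_assoc]

-- ===== VERDICT (by name: the statement is the Claim_ definition above) =====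
theorem correct_number_of_lanes_spec : Claim_equal_correct_number_of_lanes := by
  intro sequence minc _
  unfold Spec_correct_number_of_lanes correct_number_of_lanes correct_number_of_lanes_alt
  rw [pvBuildRuns_eq_rle]
  have h := pvLoopA_eq minc sequence.length sequence [] le_rfl
  simpa using h
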